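-- pv_equiv track=rewrite | github.com/programmercode62/Tech-Assignment-1 | Challenge 1/challenge_python_review.py | filter_strings
-- ===== SOURCE A (Python) =====
-- def filter_strings(string_list):
--     """
--     check each string in the list following:
--     1. if the string has at least 5 letters
--     2. if it contains at least one vowel
--     """
--
--     result = []
--
--     # looping through each string
--     for string in string_list:
--
--         # at first checking the string has at least 5 letters
--         if len(string) >= 5:
--
--             # make the string a list of letters
--             letter_list = list(string)
--
--             # looping through each letter
--             for letter in letter_list:
--
--                 # checking if the letter is vowel
--                 if letter in ['a', 'e', 'i', 'o', 'u']:
--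
--                     # adding the string to the result list
--                     result.append(string)
--
--                     # break to stop the current for loop, so we can move to the next string
--                     break
--
--     return result
-- ===== SOURCE B (Python) =====
-- def filter_strings(string_list):
--     # staged: first mark which strings contain a vowel by scanning the five
--     # vowels and substring-searching each (loop order flipped vs per-char scan),
--     # then zip the marks back and keep the long marked strings.
--     has_vowel = [any(v in s for v in "aeiou") for s in string_list]
--     return [s for s, hv in zip(string_list, has_vowel) if len(s) >= 5 and hv]
-- ===== Notes on version B (the rewrite author's own statement) =====
-- stated objective: alternative
-- what changed: Replaced A's single accumulator loop with an inner per-character scan-and-break by two staged passes: a first pass marks each string by iterating over the five vowels and substring-searching the string (loop order flipped), and a second pass zips the marks back and filters by the length guard and the mark.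
import Mathlib
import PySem

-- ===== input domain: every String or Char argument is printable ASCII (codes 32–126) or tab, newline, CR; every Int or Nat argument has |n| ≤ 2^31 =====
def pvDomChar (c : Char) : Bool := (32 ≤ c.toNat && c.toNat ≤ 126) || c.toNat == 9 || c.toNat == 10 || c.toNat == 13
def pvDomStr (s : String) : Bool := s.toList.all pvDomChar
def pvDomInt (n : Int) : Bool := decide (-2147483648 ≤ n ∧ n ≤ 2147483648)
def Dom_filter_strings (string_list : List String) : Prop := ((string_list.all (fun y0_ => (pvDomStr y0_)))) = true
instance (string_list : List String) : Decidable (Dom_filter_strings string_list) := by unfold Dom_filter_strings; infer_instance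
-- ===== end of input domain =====

-- B restructures A's single accumulator loop (per-character scan-and-break) into two
-- staged passes: mark each string by substring-searching the five vowels, then zip the
-- marks back and filter by the length guard and the mark (alternative, same cost).

-- ===== PORT A =====
-- inner 'for letter in letter_list: if letter in [...]: result.append(string); break'
def pvInnerA (string : String) (letters : List Char) (result : List String) : List String :=
  match letters with
  | [] => result
  | letter :: rest =>
      if letter ∈ ['a', 'e', 'i', 'o', 'u'] then result ++ [string]
      else pvInnerA string rest result

def filter_strings (string_list : List String) : List String :=
  string_list.foldl
    (fun result string =>
      if PySem.Str.len string ≥ 5 then pvInnerA string string.toList result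
      else result)
    []

-- ===== PORT B =====
def filter_strings_alt (string_list : List String) : List String :=
  let has_vowel := string_list.map (fun s =>
    "aeiou".toList.any (fun v => PySem.Str.isIn (String.ofList [v]) s))
  ((string_list.zip has_vowel).filter
      (fun p => decide (PySem.Str.len p.1 ≥ 5) && p.2)).map Prod.fst

-- ===== PRECONDITION & SPEC =====
def Spec_filter_strings (string_list : List String) (out : List String) : Prop := out = filter_strings_alt string_list
instance (string_list : List String) (out : List String) : Decidable (Spec_filter_strings string_list out) := by unfold Spec_filter_strings; infer_instance

-- ===== CLAIM (what is proved, stated in full; the proofs are below) =====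
def Claim_equal_filter_strings : Prop := ∀ (string_list : List String), Dom_filter_strings string_list → Spec_filter_strings string_list (filter_strings string_list)

-- ===== LEMMAS AND PROOFS =====

-- the per-string predicate both sides compute
def pvKeep (s : String) : Bool :=
  decide (PySem.Str.len s ≥ 5) && s.toList.any (fun c => decide (c ∈ ['a','e','i','o','u']))

lemma pvKeep_def (s : String) :
    pvKeep s =
      (decide (PySem.Str.len s ≥ 5) &&
        s.toList.any (fun c => decide (c ∈ ['a','e','i','o','u']))) := rfl

lemma pvInnerA_eq (string : String) (letters : List Char) (result : List String) :
    pvInnerA string letters result =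
      if letters.any (fun c => decide (c ∈ ['a','e','i','o','u'])) then result ++ [string]
      else result := by
  induction letters with
  | nil => simp [pvInnerA]
  | cons c rest ih =>
      by_cases h : c ∈ ['a','e','i','o','u']
      · have hc : decide (c ∈ ['a','e','i','o','u']) = true := by simpa using h
        rw [pvInnerA, if_pos h]
        rw [List.any_cons, hc, Bool.true_or, if_pos rfl]
      · have hc : decide (c ∈ ['a','e','i','o','u']) = false := by simpa using h
        rw [pvInnerA, if_neg h, ih]
        rw [List.any_cons, hc, Bool.false_or]

lemma pvFoldl_filter (xs : List String) (acc : List String) :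
    xs.foldl
      (fun result string =>
        if PySem.Str.len string ≥ 5 then pvInnerA string string.toList result
        else result) acc = acc ++ xs.filter pvKeep := by
  induction xs generalizing acc with
  | nil => simp
  | cons s rest ih =>
      rw [List.foldl_cons, List.filter_cons, pvKeep_def]
      by_cases h5 : PySem.Str.len s ≥ 5
      · have h5d : decide (PySem.Str.len s ≥ 5) = true := by simpa using h5
        rw [if_pos h5, pvInnerA_eq, h5d, Bool.true_and]
        rcases hv : s.toList.any (fun c => decide (c ∈ ['a','e','i','o','u'])) with _ | _
        · rw [if_neg (by simp), if_neg (by simp), ih]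
        · rw [if_pos rfl, if_pos rfl, ih]
          simp
      · have h5d : decide (PySem.Str.len s ≥ 5) = false := by simpa using h5
        rw [if_neg h5, h5d, Bool.false_and, if_neg (by simp), ih]

-- single-character substring containment is character membership
lemma pvSingleton_infix {c : Char} {l : List Char} : [c] <:+: l ↔ c ∈ l := by
  constructor
  · rintro ⟨p, q, h⟩
    subst h; simp
  · intro h
    obtain ⟨p, q, h⟩ := List.append_of_mem h
    exact ⟨p, q, by simp [h]⟩

lemma pvMark_eq (s : String) :
    "aeiou".toList.any (fun v => PySem.Str.isIn (String.ofList [v]) s) =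
      s.toList.any (fun c => decide (c ∈ ['a','e','i','o','u'])) := by
  have h : ∀ v : Char, PySem.Str.isIn (String.ofList [v]) s = decide (v ∈ s.toList) := by
    intro v
    simp only [PySem.Str.isIn_eq]
    rw [Bool.eq_iff_iff, decide_eq_true_iff]
    rw [show (String.ofList [v]).toList = [v] by simp]
    rw [PySem.Chars.isIn_iff_infix, pvSingleton_infix]
  simp only [h]
  rw [show ("aeiou".toList : List Char) = ['a','e','i','o','u'] by decide]
  rw [Bool.eq_iff_iff]
  simp only [List.any_eq_true, decide_eq_true_eq]
  constructor
  · rintro ⟨v, hv, hmem⟩; exact ⟨v, hmem, hv⟩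
  · rintro ⟨c, hc, hcv⟩; exact ⟨c, hcv, hc⟩

-- the zip-marks-then-filter staging collapses to a single filter
lemma pvZip_filter (xs : List String) (f : String → Bool) :
    ((xs.zip (xs.map f)).filter (fun p => decide (PySem.Str.len p.1 ≥ 5) && p.2)).map Prod.fst =
      xs.filter (fun x => decide (PySem.Str.len x ≥ 5) && f x) := by
  induction xs with
  | nil => rfl
  | cons x rest ih =>
      simp only [List.map_cons, List.zip_cons_cons, List.filter_cons]
      rcases h : decide (PySem.Str.len x ≥ 5) && f x with _ | _
      · simpa [h] using ih
      · simpa [h] using ih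

-- ===== VERDICT (by name: the statement is the Claim_ definition above) =====
theorem filter_strings_spec : Claim_equal_filter_strings := by
  intro string_list _
  unfold Spec_filter_strings filter_strings filter_strings_alt
  rw [pvFoldl_filter, List.nil_append]
  simp only
  rw [pvZip_filter]
  apply List.filter_congr
  intro s _
  rw [pvKeep_def, pvMark_eq]
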